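-- pv_equiv track=rewrite | github.com/alphabestteam/Maya | python_advanced_3.py | return_sequence
-- ===== SOURCE A (Python) =====
-- def return_sequence(N: int) -> int:
--     index_before = 2
--     index_two_before = 1
--     for index in range(1, N + 1):
--         if index == 1:
--             yield 1
--         elif index == 2:
--             yield 2
--         else:
--             new_value = index_before * index_two_before
--             yield new_value
--             index_two_before = index_before
--             index_before = new_value
-- ===== SOURCE B (Python) =====
-- def return_sequence(N: int) -> int:
--     # each term is 2 raised to a Fibonacci number: exponents 0, 1, 1, 2, 3, 5, ...
--     a, b = 0, 1
--     for _ in range(N):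
--         yield 2 ** a
--         a, b = b, a + b
-- ===== Notes on version B (the rewrite author's own statement) =====
-- stated objective: alternative
-- what changed: B maintains two running Fibonacci exponents and yields two raised to the current exponent each step, instead of A's carrying and multiplying the two previous products with special-case branches for the first two indices.
import Mathlib
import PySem

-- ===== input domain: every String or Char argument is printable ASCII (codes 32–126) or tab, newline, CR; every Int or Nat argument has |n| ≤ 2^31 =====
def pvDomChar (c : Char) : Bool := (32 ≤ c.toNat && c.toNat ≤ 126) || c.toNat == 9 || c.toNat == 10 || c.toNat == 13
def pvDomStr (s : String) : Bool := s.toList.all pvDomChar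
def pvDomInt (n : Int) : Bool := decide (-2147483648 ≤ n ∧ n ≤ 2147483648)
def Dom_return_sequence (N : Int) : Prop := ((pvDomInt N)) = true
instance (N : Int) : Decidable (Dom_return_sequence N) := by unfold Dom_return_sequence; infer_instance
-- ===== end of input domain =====

-- B yields the sequence generated by two running Fibonacci exponents (2**a with a,b = b,a+b)
-- instead of A's carrying of the two previous products; return-value equivalence (both Pythons are generators).

-- ===== PORT A =====
-- A's loop body over range(1, N+1), state = (yielded list, index_before, index_two_before)
def pvStepA (s : List Int × Int × Int) (index : Int) : List Int × Int × Int :=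
  if index == 1 then (s.1 ++ [1], s.2.1, s.2.2)
  else if index == 2 then (s.1 ++ [2], s.2.1, s.2.2)
  else
    let new_value := s.2.1 * s.2.2
    (s.1 ++ [new_value], new_value, s.2.1)

def return_sequence (N : Int) : List Int :=
  ((PySem.List.pyRange 1 (N + 1) 1).foldl pvStepA ([], 2, 1)).1

-- ===== PORT B =====
-- B's loop: for _ in range(N): yield 2**a; a, b = b, a+b
def pvGoB : Nat → Nat → Nat → List Int
  | 0, _, _ => []
  | n + 1, a, b => (2 : Int) ^ a :: pvGoB n b (a + b)

def return_sequence_alt (N : Int) : List Int := pvGoB N.toNat 0 1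

-- ===== PRECONDITION & SPEC =====
def Spec_return_sequence (N : Int) (out : List Int) : Prop := out = return_sequence_alt N
instance (N : Int) (out : List Int) : Decidable (Spec_return_sequence N out) := by unfold Spec_return_sequence; infer_instance

-- ===== CLAIM (what is proved, stated in full; the proofs are below) =====
def Claim_equal_return_sequence : Prop := ∀ (N : Int), Dom_return_sequence N → Spec_return_sequence N (return_sequence N)

-- ===== LEMMAS AND PROOFS =====

theorem pvGoB_snd_congr (n : Nat) (a b b' : Nat) (h : b = b') :
    pvGoB n a b = pvGoB n a b' := by rw [h]

-- Invariant: folding A's step over a list of indices all ≥ 3, from state (acc, 2^u, 2^v),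
-- appends exactly B's tail pvGoB len (u+v) (u+v+u).
theorem pvFold_ge3 (l : List Int) (acc : List Int) (u v : Nat)
    (h3 : ∀ i ∈ l, 3 ≤ i) :
    (l.foldl pvStepA (acc, (2 : Int) ^ u, (2 : Int) ^ v)).1
      = acc ++ pvGoB l.length (u + v) (u + v + u) := by
  induction l generalizing acc u v with
  | nil => simp [pvGoB]
  | cons i l ih =>
    have hi : 3 ≤ i := h3 i (by simp)
    have h1 : ¬ (i == 1) := by simp; omega
    have h2 : ¬ (i == 2) := by simp; omega
    have hmul : (2 : Int) ^ u * (2 : Int) ^ v = (2 : Int) ^ (u + v) := (pow_add 2 u v).symm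
    simp only [List.foldl_cons, pvStepA, h1, h2, if_false, Bool.false_eq_true]
    rw [hmul]
    rw [ih (acc ++ [(2 : Int) ^ (u + v)]) (u + v) u (fun j hj => h3 j (by simp [hj]))]
    simp [pvGoB, List.append_assoc]
    exact pvGoB_snd_congr _ _ _ _ (by omega)

theorem pvMain (N : Int) : return_sequence N = return_sequence_alt N := by
  unfold return_sequence return_sequence_alt
  rcases (show N ≤ 0 ∨ 0 < N by omega) with h0 | h0
  · rw [PySem.List.pyRange_one_eq_nil (by omega)]
    have : N.toNat = 0 := by omega
    simp [this, pvGoB]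
  · rcases (show N = 1 ∨ 1 < N by omega) with h1 | h1
    · -- N = 1
      have : N = 1 := h1
      subst this
      decide
    · -- N ≥ 2
      have hr : PySem.List.pyRange 1 (N + 1) 1
          = 1 :: 2 :: PySem.List.pyRange 3 (N + 1) 1 := by
        rw [PySem.List.pyRange_one_cons (by omega), PySem.List.pyRange_one_cons (by omega)]
        norm_num
      rw [hr]
      simp only [List.foldl_cons, pvStepA]
      norm_num
      have hstart : (([1, 2] : List Int), (2 : Int), (1 : Int))
          = (([1, 2] : List Int), (2 : Int) ^ (1 : Nat), (2 : Int) ^ (0 : Nat)) := by norm_num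
      rw [hstart, pvFold_ge3 _ _ 1 0
        (fun i hi => ((PySem.List.mem_pyRange_one).1 hi).1)]
      have hlen : (PySem.List.pyRange 3 (N + 1) 1).length = N.toNat - 2 := by
        rw [PySem.List.length_pyRange_one]; omega
      have hN : N.toNat = (N.toNat - 2) + 2 := by omega
      rw [hlen, hN]
      simp [pvGoB]

-- ===== VERDICT (by name: the statement is the Claim_ definition above) =====
theorem return_sequence_spec : Claim_equal_return_sequence :=
  fun N _ => pvMain N
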